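-- pv_equiv track=rewrite | github.com/davidleathers113/indexforge | src/core/utils/text/chunking.py | merge_overlapping_chunks
-- ===== SOURCE A (Python) =====
-- from typing import List, Tuple
--
-- def merge_overlapping_chunks(
--     chunks: List[Tuple[str, Tuple[int, int]]], min_overlap: int = 20
-- ) -> List[Tuple[str, Tuple[int, int]]]:
--     """Merge chunks with significant overlap.
--
--     Args:
--         chunks: List of text chunks with positions
--         min_overlap: Minimum characters overlap to merge chunks
--
--     Returns:
--         List of merged chunks with positions
--
--     Raises:
--         ValueError: If input chunks are invalid
--     """
--     if not chunks:
--         return []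
--     if min_overlap < 0:
--         raise ValueError("min_overlap must be non-negative")
--
--     merged = []
--     current_chunk = chunks[0]
--
--     for next_chunk in chunks[1:]:
--         curr_text, (curr_start, curr_end) = current_chunk
--         next_text, (next_start, next_end) = next_chunk
--
--         # Check for significant overlap
--         overlap = curr_end - next_start
--         if overlap >= min_overlap:
--             # Merge chunks
--             merged_text = curr_text + next_text[overlap:]
--             current_chunk = (merged_text, (curr_start, next_end))
--         else:
--             merged.append(current_chunk)
--             current_chunk = next_chunk
--
--     merged.append(current_chunk)
--     return merged
-- ===== SOURCE B (Python) =====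
-- from typing import List, Tuple
--
--
-- def merge_overlapping_chunks(
--     chunks: List[Tuple[str, Tuple[int, int]]], min_overlap: int = 20
-- ) -> List[Tuple[str, Tuple[int, int]]]:
--     """Two-pass variant: first cut the list into mergeable groups at seams
--     with insufficient overlap, then collapse each group into one chunk."""
--     if not chunks:
--         return []
--     if min_overlap < 0:
--         raise ValueError("min_overlap must be non-negative")
--
--     # Pass 1: group consecutive chunks; cut where end_prev - start_next < min_overlap
--     groups = []
--     group = [chunks[0]]
--     for nxt in chunks[1:]:
--         if group[-1][1][1] - nxt[1][0] >= min_overlap: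
--             group.append(nxt)
--         else:
--             groups.append(group)
--             group = [nxt]
--     groups.append(group)
--
--     # Pass 2: collapse each group left-to-right
--     out = []
--     for g in groups:
--         text = g[0][0]
--         end = g[0][1][1]
--         for t, (s, e) in g[1:]:
--             text += t[end - s:]
--             end = e
--         out.append((text, (g[0][1][0], end)))
--     return out
-- ===== Notes on version B (the rewrite author's own statement) =====
-- stated objective: alternative
-- what changed: A's single sweep that grows a running merged chunk is replaced by two passes: first cut the chunk list into groups at seams where end_prev - start_next < min_overlap, then collapse each group by a left fold appending the non-overlapping tails.
import Mathlib
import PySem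

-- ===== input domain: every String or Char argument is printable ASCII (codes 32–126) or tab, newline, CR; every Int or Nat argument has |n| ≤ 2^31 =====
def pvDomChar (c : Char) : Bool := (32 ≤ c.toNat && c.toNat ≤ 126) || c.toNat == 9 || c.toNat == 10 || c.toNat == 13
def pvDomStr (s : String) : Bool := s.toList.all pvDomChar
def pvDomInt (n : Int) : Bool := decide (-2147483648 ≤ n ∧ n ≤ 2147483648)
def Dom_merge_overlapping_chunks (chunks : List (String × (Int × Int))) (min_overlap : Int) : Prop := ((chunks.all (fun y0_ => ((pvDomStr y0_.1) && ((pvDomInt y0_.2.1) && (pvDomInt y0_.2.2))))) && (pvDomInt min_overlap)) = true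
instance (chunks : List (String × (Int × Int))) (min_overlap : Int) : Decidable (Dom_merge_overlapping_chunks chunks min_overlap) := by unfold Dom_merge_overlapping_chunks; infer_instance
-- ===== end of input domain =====

-- B changes the decomposition: one sweep carrying a growing merged chunk (A) becomes
-- two passes — cut the list into groups at weak seams, then collapse each group (objective: alternative).

-- ===== PORT A =====
-- loop body of A: state is (merged, current_chunk)
def pvStepA (min_overlap : Int)
    (st : List (String × (Int × Int)) × (String × (Int × Int)))
    (nxt : String × (Int × Int)) :
    List (String × (Int × Int)) × (String × (Int × Int)) :=
  let overlap := st.2.2.2 - nxt.2.1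
  if min_overlap ≤ overlap then
    (st.1, (st.2.1 ++ PySem.Str.slice nxt.1 (some overlap) none, (st.2.2.1, nxt.2.2)))
  else
    (st.1 ++ [st.2], nxt)

def merge_overlapping_chunks (chunks : List (String × (Int × Int))) (min_overlap : Int) : List (String × (Int × Int)) :=
  match chunks with
  | [] => []
  | c0 :: rest =>
    if min_overlap < 0 then []   -- Python raises ValueError here; excluded by Pre_
    else
      let p := rest.foldl (pvStepA min_overlap) ([], c0)
      p.1 ++ [p.2]

-- ===== PORT B =====
-- pass-1 body of B: state is (groups, group); cut where the seam overlap is too small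
def pvStepB (min_overlap : Int)
    (st : List (List (String × (Int × Int))) × List (String × (Int × Int)))
    (nxt : String × (Int × Int)) :
    List (List (String × (Int × Int))) × List (String × (Int × Int)) :=
  if min_overlap ≤ st.2.getLast!.2.2 - nxt.2.1 then
    (st.1, st.2 ++ [nxt])
  else
    (st.1 ++ [st.2], [nxt])

-- pass-2 inner body: extend the text by the non-overlapping tail, track the running end
def pvCollapseStep (st : String × Int) (p : String × (Int × Int)) : String × Int :=
  (st.1 ++ PySem.Str.slice p.1 (some (st.2 - p.2.1)) none, p.2.2)

-- pass-2 of B: collapse one group into a single chunk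
def pvCollapse (g : List (String × (Int × Int))) : String × (Int × Int) :=
  match g with
  | [] => ("", (0, 0))   -- unreachable: groups are never empty
  | f :: t =>
    let q := t.foldl pvCollapseStep (f.1, f.2.2)
    (q.1, (f.2.1, q.2))

def merge_overlapping_chunks_alt (chunks : List (String × (Int × Int))) (min_overlap : Int) : List (String × (Int × Int)) :=
  match chunks with
  | [] => []
  | c0 :: rest =>
    if min_overlap < 0 then []   -- same guard as Source B's raise; excluded by Pre_
    else
      let q := rest.foldl (pvStepB min_overlap) ([], [c0])
      (q.1 ++ [q.2]).map pvCollapse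

-- ===== PRECONDITION & SPEC =====
-- Pre_ excludes exactly the inputs where A raises ValueError (non-empty chunks with negative min_overlap).
def Pre_merge_overlapping_chunks (chunks : List (String × (Int × Int))) (min_overlap : Int) : Prop :=
  chunks = [] ∨ 0 ≤ min_overlap
instance (chunks : List (String × (Int × Int))) (min_overlap : Int) : Decidable (Pre_merge_overlapping_chunks chunks min_overlap) := by unfold Pre_merge_overlapping_chunks; infer_instance

def pvWitness_merge_overlapping_chunks : (List (String × (Int × Int))) × Int :=
  ([("abcde", (0, 5)), ("defgh", (3, 8)), ("xy", (20, 22))], 2)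

def Spec_merge_overlapping_chunks (chunks : List (String × (Int × Int))) (min_overlap : Int) (out : List (String × (Int × Int))) : Prop := out = merge_overlapping_chunks_alt chunks min_overlap
instance (chunks : List (String × (Int × Int))) (min_overlap : Int) (out : List (String × (Int × Int))) : Decidable (Spec_merge_overlapping_chunks chunks min_overlap out) := by unfold Spec_merge_overlapping_chunks; infer_instance

-- ===== CLAIM (what is proved, stated in full; the proofs are below) =====
def Claim_equal_merge_overlapping_chunks : Prop := ∀ (chunks : List (String × (Int × Int))) (min_overlap : Int), Dom_merge_overlapping_chunks chunks min_overlap → Pre_merge_overlapping_chunks chunks min_overlap → Spec_merge_overlapping_chunks chunks min_overlap (merge_overlapping_chunks chunks min_overlap)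

-- ===== LEMMAS AND PROOFS =====

-- the running end of pass-2's fold is the last element's end (the text does not matter)
lemma pvCollapse_end (gt : List (String × (Int × Int))) :
    ∀ (f : String × (Int × Int)) (txt : String),
    (gt.foldl pvCollapseStep (txt, f.2.2)).2 = (f :: gt).getLast!.2.2 := by
  induction gt with
  | nil => intro f txt; simp [List.getLast!]
  | cons h t ih =>
    intro f txt
    simp only [List.foldl_cons, pvCollapseStep]
    have := ih h (txt ++ PySem.Str.slice h.1 (some (f.2.2 - h.2.1)) none)
    simpa [List.getLast!] using this

lemma pvCollapse_snd_snd (f : String × (Int × Int)) (gt : List (String × (Int × Int))) :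
    (pvCollapse (f :: gt)).2.2 = (f :: gt).getLast!.2.2 := by
  simp only [pvCollapse]
  exact pvCollapse_end gt f f.1

-- appending one chunk to a non-empty group = A's merge step on the collapsed chunk
lemma pvCollapse_append (f : String × (Int × Int)) (gt : List (String × (Int × Int)))
    (x : String × (Int × Int)) :
    pvCollapse ((f :: gt) ++ [x]) =
      ((pvCollapse (f :: gt)).1 ++
        PySem.Str.slice x.1 (some ((pvCollapse (f :: gt)).2.2 - x.2.1)) none,
       ((pvCollapse (f :: gt)).2.1, x.2.2)) := by
  simp [pvCollapse, List.foldl_append, pvCollapseStep]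

-- main loop invariant: A's fold from (groups.map pvCollapse, pvCollapse group)
-- matches B's fold from (groups, group), for any non-empty group
lemma pvLoop_eq (min_overlap : Int) (rest : List (String × (Int × Int))) :
    ∀ (groups : List (List (String × (Int × Int)))) (f : String × (Int × Int))
      (gt : List (String × (Int × Int))),
    (rest.foldl (pvStepA min_overlap) (groups.map pvCollapse, pvCollapse (f :: gt))).1 ++
      [(rest.foldl (pvStepA min_overlap) (groups.map pvCollapse, pvCollapse (f :: gt))).2] =
    ((rest.foldl (pvStepB min_overlap) (groups, f :: gt)).1 ++
      [(rest.foldl (pvStepB min_overlap) (groups, f :: gt)).2]).map pvCollapse := by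
  induction rest with
  | nil => intro groups f gt; simp
  | cons nxt rest ih =>
    intro groups f gt
    simp only [List.foldl_cons, pvStepA, pvStepB]
    rw [← pvCollapse_snd_snd f gt]
    by_cases hc : min_overlap ≤ (pvCollapse (f :: gt)).2.2 - nxt.2.1
    · simp only [hc, if_pos]
      rw [← pvCollapse_append f gt nxt]
      exact ih groups f (gt ++ [nxt])
    · simp only [hc, if_neg, not_false_iff]
      have : (groups.map pvCollapse) ++ [pvCollapse (f :: gt)] =
          (groups ++ [f :: gt]).map pvCollapse := by simp
      rw [this]
      have hx : nxt = pvCollapse [nxt] := by simp [pvCollapse]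
      conv_lhs => rw [hx]
      exact ih (groups ++ [f :: gt]) nxt []

-- ===== VERDICT (by name: the statement is the Claim_ definition above) =====
theorem merge_overlapping_chunks_spec : Claim_equal_merge_overlapping_chunks := by
  intro chunks min_overlap _ _
  unfold Spec_merge_overlapping_chunks merge_overlapping_chunks merge_overlapping_chunks_alt
  cases chunks with
  | nil => rfl
  | cons c0 rest =>
    by_cases hm : min_overlap < 0
    · simp [hm]
    · simp only [hm, if_neg, not_false_iff]
      have := pvLoop_eq min_overlap rest [] c0 []
      simpa [pvCollapse] using this
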